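-- pv_equiv track=rewrite | github.com/nasir-syed/NOVEC-vectorless-RAG | cli_utils.py | validate_comma_separated_numbers
-- ===== SOURCE A (Python) =====
-- from typing import List, Optional
--
-- def validate_comma_separated_numbers(input_str: str, max_count: int = None, max_value: int = None) -> Optional[List[int]]:
--     try:
--         numbers = [int(x.strip()) for x in input_str.split(",")]
--
--         if max_count and len(numbers) > max_count:
--             return None
--
--         if max_value and any(n > max_value for n in numbers):
--             return None
--
--         if len(numbers) != len(set(numbers)):
--             return None
--
--         if any(n < 1 for n in numbers):
--             return None
--
--         return numbers
--     except ValueError: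
--         return None
-- ===== SOURCE B (Python) =====
-- def validate_comma_separated_numbers(input_str: str, max_count: int = None, max_value: int = None):
--     try:
--         numbers = [int(x.strip()) for x in input_str.split(",")]
--     except ValueError:
--         return None
--     if max_count and len(numbers) > max_count:
--         return None
--     seen = set()
--     for n in numbers:
--         if n in seen:
--             return None
--         if max_value and n > max_value:
--             return None
--         if n < 1:
--             return None
--         seen.add(n)
--     return numbers
-- ===== Notes on version B (the rewrite author's own statement) =====
-- stated objective: alternative
-- what changed: A's three separate whole-list scans (any(n > max_value), the len(set) uniqueness check, any(n < 1)) are fused into one early-exit loop over the numbers that maintains a seen set; the parse comprehension and the max_count falsy guard are kept.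
import Mathlib
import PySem

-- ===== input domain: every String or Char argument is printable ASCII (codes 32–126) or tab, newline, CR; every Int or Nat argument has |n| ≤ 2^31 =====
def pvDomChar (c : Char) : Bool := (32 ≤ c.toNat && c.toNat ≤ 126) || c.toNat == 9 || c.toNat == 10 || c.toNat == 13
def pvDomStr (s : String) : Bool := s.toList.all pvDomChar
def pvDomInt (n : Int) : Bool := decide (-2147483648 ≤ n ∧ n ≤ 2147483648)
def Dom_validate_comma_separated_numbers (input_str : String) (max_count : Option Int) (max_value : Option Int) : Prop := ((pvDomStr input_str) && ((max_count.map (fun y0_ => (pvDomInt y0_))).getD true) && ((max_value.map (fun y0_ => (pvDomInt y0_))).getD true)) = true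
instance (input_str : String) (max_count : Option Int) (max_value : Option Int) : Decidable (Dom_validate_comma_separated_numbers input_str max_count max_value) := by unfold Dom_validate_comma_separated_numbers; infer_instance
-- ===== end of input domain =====

-- B fuses A's three separate scans (max_value check, uniqueness via len(set), n<1 check)
-- into one early-exit loop maintaining a `seen` set; alternative decomposition, same results.

-- shared by both ports: both Pythons contain the same comprehension
-- [int(x.strip()) for x in input_str.split(",")] (none = ValueError)
def pvParse (input_str : String) : Option (List Int) :=
  match PySem.Str.split? input_str "," with
  | none => none  -- unreachable: the separator "," is non-empty
  | some parts => parts.mapM (fun x => PySem.Int.ofStr? (PySem.Str.strip x))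

-- shared guard, in both Pythons: 'max_count and len(numbers) > max_count' (None and 0 falsy)
def pvCountGuard (max_count : Option Int) (len : Int) : Bool :=
  match max_count with
  | none => false
  | some c => c != 0 && decide (len > c)

-- ===== PORT A =====
def validate_comma_separated_numbers (input_str : String) (max_count : Option Int) (max_value : Option Int) : Option (List Int) :=
  match pvParse input_str with
  | none => none
  | some numbers =>
    if pvCountGuard max_count (numbers.length : Int) then none
    else if (match max_value with
             | none => false
             | some v => v != 0 && numbers.any (fun n => decide (n > v))) then none
    else if numbers.length ≠ (PySem.Set.ofList numbers).length then none
    else if numbers.any (fun n => decide (n < 1)) then none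
    else some numbers

-- ===== PORT B =====
-- Python B: 'max_value and n > max_value' inside the loop body
def pvValGuard (max_value : Option Int) (n : Int) : Bool :=
  match max_value with
  | none => false
  | some v => v != 0 && decide (n > v)

-- the for-loop of B: seen-set, early return None
def pvLoop (max_value : Option Int) (numbers : List Int) : List Int → PySem.Set Int → Option (List Int)
  | [], _ => some numbers
  | n :: rest, seen =>
    if PySem.Set.contains seen n then none
    else if pvValGuard max_value n then none
    else if n < 1 then none
    else pvLoop max_value numbers rest (PySem.Set.add seen n)

def validate_comma_separated_numbers_alt (input_str : String) (max_count : Option Int) (max_value : Option Int) : Option (List Int) :=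
  match pvParse input_str with
  | none => none
  | some numbers =>
    if pvCountGuard max_count (numbers.length : Int) then none
    else pvLoop max_value numbers numbers PySem.Set.empty

-- ===== PRECONDITION & SPEC =====
def Spec_validate_comma_separated_numbers (input_str : String) (max_count : Option Int) (max_value : Option Int) (out : Option (List Int)) : Prop := out = validate_comma_separated_numbers_alt input_str max_count max_value
instance (input_str : String) (max_count : Option Int) (max_value : Option Int) (out : Option (List Int)) : Decidable (Spec_validate_comma_separated_numbers input_str max_count max_value out) := by unfold Spec_validate_comma_separated_numbers; infer_instance

-- ===== CLAIM (what is proved, stated in full; the proofs are below) =====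
def Claim_equal_validate_comma_separated_numbers : Prop := ∀ (input_str : String) (max_count : Option Int) (max_value : Option Int), Dom_validate_comma_separated_numbers input_str max_count max_value → Spec_validate_comma_separated_numbers input_str max_count max_value (validate_comma_separated_numbers input_str max_count max_value)

-- ===== LEMMAS AND PROOFS =====

lemma foldl_add_le (xs : List Int) : ∀ s : PySem.Set Int,
    (xs.foldl PySem.Set.add s).length ≤ s.length + xs.length := by
  induction xs with
  | nil => intro s; simp
  | cons x t ih =>
    intro s
    simp only [List.foldl_cons, List.length_cons]
    calc (t.foldl PySem.Set.add (PySem.Set.add s x)).length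
        ≤ (PySem.Set.add s x).length + t.length := ih _
      _ ≤ s.length + (t.length + 1) := by
          unfold PySem.Set.add
          split <;> (simp; try omega)

lemma foldl_add_eq_iff (xs : List Int) : ∀ s : PySem.Set Int,
    (xs.foldl PySem.Set.add s).length = s.length + xs.length ↔
      xs.Nodup ∧ ∀ x ∈ xs, x ∉ s := by
  induction xs with
  | nil => intro s; simp
  | cons x t ih =>
    intro s
    simp only [List.foldl_cons, List.length_cons, List.nodup_cons]
    by_cases hx : x ∈ s
    · have hadd : PySem.Set.add s x = s := by
        unfold PySem.Set.add; rw [if_pos ((PySem.Set.contains_iff s x).mpr hx)]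
      rw [hadd]
      constructor
      · intro h; exact absurd (foldl_add_le t s) (by omega)
      · rintro ⟨-, h⟩; exact absurd hx (h x (by simp))
    · have hadd : PySem.Set.add s x = s ++ [x] := by
        unfold PySem.Set.add
        split
        · next hc => exact absurd ((PySem.Set.contains_iff s x).mp hc) hx
        · rfl
      rw [hadd]
      have harith : ((t.foldl PySem.Set.add (s ++ [x])).length = s.length + (t.length + 1)) ↔
          ((t.foldl PySem.Set.add (s ++ [x])).length = (s ++ [x]).length + t.length) := by
        simp only [List.length_append, List.length_singleton]; omega
      rw [harith, ih]
      constructor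
      · rintro ⟨hnd, hmem⟩
        refine ⟨⟨fun hxt => ?_, hnd⟩, fun y hy => ?_⟩
        · exact (hmem x hxt) (by simp)
        · rcases List.mem_cons.mp hy with rfl | hyt
          · exact hx
          · intro hys; exact (hmem y hyt) (by simp [hys])
      · rintro ⟨⟨hxt, hnd⟩, hmem⟩
        refine ⟨hnd, fun y hyt => ?_⟩
        simp only [List.mem_append, List.mem_singleton]
        rintro (hys | rfl)
        · exact (hmem y (by simp [hyt])) hys
        · exact hxt hyt

lemma length_ofList_eq_iff (xs : List Int) :
    (PySem.Set.ofList xs).length = xs.length ↔ xs.Nodup := by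
  have := foldl_add_eq_iff xs PySem.Set.empty
  rw [PySem.Set.ofList_eq_foldl]
  simpa [PySem.Set.empty] using this

lemma pvLoop_eq (mv : Option Int) (numbers : List Int) (rest : List Int) :
    ∀ seen : PySem.Set Int,
    pvLoop mv numbers rest seen =
      if rest.Nodup ∧ (∀ n ∈ rest, n ∉ seen) ∧
         (∀ n ∈ rest, pvValGuard mv n = false) ∧ (∀ n ∈ rest, ¬ n < 1)
      then some numbers else none := by
  induction rest with
  | nil => intro seen; simp [pvLoop]
  | cons n t ih =>
    intro seen
    simp only [pvLoop]
    by_cases h1 : n ∈ seen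
    · rw [if_pos ((PySem.Set.contains_iff seen n).mpr h1), if_neg]
      rintro ⟨-, hm, -, -⟩; exact (hm n (by simp)) h1
    · rw [if_neg (fun hc => h1 ((PySem.Set.contains_iff seen n).mp hc))]
      by_cases h2 : pvValGuard mv n = true
      · rw [if_pos h2, if_neg]; rintro ⟨-, -, hv, -⟩
        simp [hv n (by simp)] at h2
      · rw [if_neg h2]
        have h2' : pvValGuard mv n = false := by simpa using h2
        by_cases h3 : n < 1
        · rw [if_pos h3, if_neg]; rintro ⟨-, -, -, hl⟩; exact (hl n (by simp)) h3
        · rw [if_neg h3, ih]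
          have hiff : (t.Nodup ∧ (∀ m ∈ t, m ∉ PySem.Set.add seen n) ∧
              (∀ m ∈ t, pvValGuard mv m = false) ∧ (∀ m ∈ t, ¬ m < 1)) ↔
              ((n :: t).Nodup ∧ (∀ m ∈ n :: t, m ∉ seen) ∧
              (∀ m ∈ n :: t, pvValGuard mv m = false) ∧ (∀ m ∈ n :: t, ¬ m < 1)) := by
            simp only [List.nodup_cons, List.mem_cons, forall_eq_or_imp, PySem.Set.mem_add,
              not_or]
            constructor
            · rintro ⟨hnd, hm, hv, hl⟩
              refine ⟨⟨fun hnt => (hm n hnt).2 rfl, hnd⟩, ⟨h1, fun m hmt => (hm m hmt).1⟩,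
                ⟨h2', hv⟩, ⟨h3, hl⟩⟩
            · rintro ⟨⟨hnt, hnd⟩, ⟨-, hm⟩, ⟨-, hv⟩, ⟨-, hl⟩⟩
              exact ⟨hnd, fun m hmt => ⟨hm m hmt, fun he => hnt (he ▸ hmt)⟩, hv, hl⟩
          rw [if_congr hiff rfl rfl]

-- ===== VERDICT (by name: the statement is the Claim_ definition above) =====
theorem validate_comma_separated_numbers_spec : Claim_equal_validate_comma_separated_numbers := by
  intro input_str mc mv hdom
  clear hdom
  unfold Spec_validate_comma_separated_numbers
  unfold validate_comma_separated_numbers validate_comma_separated_numbers_alt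
  cases hp : pvParse input_str with
  | none => rfl
  | some numbers =>
    by_cases hc : pvCountGuard mc (numbers.length : Int) = true
    · simp only [hc, if_true]
    · simp only [hc, if_false, Bool.false_eq_true]
      rw [pvLoop_eq]
      by_cases hmv : (match mv with
          | none => false
          | some v => v != 0 && numbers.any (fun n => decide (n > v))) = true
      · rw [if_pos hmv, if_neg]
        rintro ⟨-, -, hv, -⟩
        cases mv with
        | none => simp at hmv
        | some v =>
          simp only [bne_iff_ne, ne_eq, Bool.and_eq_true, List.any_eq_true,
            decide_eq_true_eq] at hmv
          obtain ⟨hv0, n, hn, hgt⟩ := hmv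
          have := hv n hn
          simp only [pvValGuard, Bool.and_eq_false_iff, bne_eq_false_iff_eq,
            decide_eq_false_iff_not] at this
          rcases this with h | h
          · exact hv0 h
          · exact absurd hgt (by simpa using h)
      · rw [if_neg hmv]
        by_cases hnd : numbers.Nodup
        · rw [if_neg (fun h => h (((length_ofList_eq_iff numbers).mpr hnd).symm))]
          by_cases hlt : numbers.any (fun n => decide (n < 1)) = true
          · rw [if_pos hlt, if_neg]
            rintro ⟨-, -, -, hl⟩
            simp only [List.any_eq_true, decide_eq_true_eq] at hlt
            obtain ⟨n, hn, h⟩ := hlt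
            exact (hl n hn) h
          · rw [if_neg hlt, if_pos]
            refine ⟨hnd, by simp [PySem.Set.empty], ?_, ?_⟩
            · intro n hn
              cases mv with
              | none => rfl
              | some v =>
                simp only [pvValGuard, Bool.and_eq_false_iff, bne_eq_false_iff_eq,
                  decide_eq_false_iff_not]
                simp only [Bool.and_eq_true, List.any_eq_true, decide_eq_true_eq,
                  not_and, not_exists, bne_iff_ne, ne_eq] at hmv
                by_cases hv0 : v = 0
                · exact Or.inl hv0
                · refine Or.inr (fun hgt => ?_)
                  have := hmv hv0
                  push Not at this
                  exact absurd hgt (by have h := this n hn; omega)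
            · intro n hn h
              exact hlt (by simp only [List.any_eq_true, decide_eq_true_eq]; exact ⟨n, hn, h⟩)
        · rw [if_pos (fun heq => hnd ((length_ofList_eq_iff numbers).mp heq.symm)), if_neg]
          rintro ⟨hnd', -⟩; exact hnd hnd'
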